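-- pv_equiv track=rewrite | github.com/titou4n/NSI_Projet_2_Voyageur_de_Commerce | main.py | verif_path
-- ===== SOURCE A (Python) =====
-- def verif_path(path, graph):
--   '''
--   Fonction pour vérifier si un chemin est valide.
--   Argument:
--       path (list) : liste du chemin.
--       graph (dict): Dictionnaire des distances entre les villes.
--   Return:
--       True  : si le chemin est valide
--       False : si le chemin n'est pas valide
--   Complexité mathématique :  O(n)
--   '''
--   if len(path) != len(graph) + 1 or path[0] != path[-1]:
--     return False
--   else:
--     lst_city_use = []
--     for i in range(len(path) - 1):
--       if path[i] in lst_city_use: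
--         return False
--       else:
--         lst_city_use.append(path[i])
--     return True
-- ===== SOURCE B (Python) =====
-- def verif_path(path, graph):
--   if len(path) != len(graph) + 1 or path[0] != path[-1]:
--     return False
--   s = sorted(path[:-1])
--   return all(a != b for a, b in zip(s, s[1:]))
-- ===== Notes on version B (the rewrite author's own statement) =====
-- stated objective: alternative
-- what changed: replaced A's incremental seen-list scan (linear membership test per element, early return) with sort-then-adjacent-scan duplicate detection: sort path[:-1] and check no two neighbouring elements are equal
import Mathlib
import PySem

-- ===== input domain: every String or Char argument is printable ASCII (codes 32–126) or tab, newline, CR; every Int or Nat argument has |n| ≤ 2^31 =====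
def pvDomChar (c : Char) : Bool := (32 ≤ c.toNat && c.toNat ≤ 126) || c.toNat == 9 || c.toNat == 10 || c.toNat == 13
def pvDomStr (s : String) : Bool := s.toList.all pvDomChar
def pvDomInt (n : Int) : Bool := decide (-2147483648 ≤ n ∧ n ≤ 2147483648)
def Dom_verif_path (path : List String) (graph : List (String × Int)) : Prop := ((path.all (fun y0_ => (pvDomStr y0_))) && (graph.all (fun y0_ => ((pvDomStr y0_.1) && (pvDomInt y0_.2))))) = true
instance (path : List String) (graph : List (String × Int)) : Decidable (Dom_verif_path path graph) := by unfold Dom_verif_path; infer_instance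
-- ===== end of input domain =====

-- ===== PORT A =====
-- B changes the algorithm: A scans with an incremental seen-list; B sorts path[:-1]
-- and checks no two adjacent elements are equal (objective: alternative).
-- A's loop 'for i in range(len(path)-1)' reads exactly path[:-1]; the seen-list
-- accumulator and the early 'return False' are kept as the recursion's state/result.
def verifLoopA : List String → List String → Bool
  | _, [] => true
  | lst_city_use, c :: rest =>
      if lst_city_use.contains c then false
      else verifLoopA (lst_city_use ++ [c]) rest

def verif_path (path : List String) (graph : List (String × Int)) : Bool :=
  if PySem.List.len path ≠ ((PySem.Dict.ofList graph).size : Int) + 1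
      ∨ PySem.List.pyGet? path 0 ≠ PySem.List.pyGet? path (-1) then
    false
  else
    verifLoopA [] (PySem.List.slice path none (some (-1)))

-- ===== PORT B =====
-- s = sorted(path[:-1]); all(a != b for a, b in zip(s, s[1:]))
def verif_path_alt (path : List String) (graph : List (String × Int)) : Bool :=
  if PySem.List.len path ≠ ((PySem.Dict.ofList graph).size : Int) + 1
      ∨ PySem.List.pyGet? path 0 ≠ PySem.List.pyGet? path (-1) then
    false
  else
    let s := PySem.List.sorted (PySem.List.slice path none (some (-1))) (fun x => x) false
    (s.zip (PySem.List.slice s (some 1) none)).all (fun p => p.1 != p.2)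

-- ===== PRECONDITION & SPEC =====
def Spec_verif_path (path : List String) (graph : List (String × Int)) (out : Bool) : Prop := out = verif_path_alt path graph
instance (path : List String) (graph : List (String × Int)) (out : Bool) : Decidable (Spec_verif_path path graph out) := by unfold Spec_verif_path; infer_instance

-- ===== CLAIM (what is proved, stated in full; the proofs are below) =====
def Claim_equal_verif_path : Prop := ∀ (path : List String) (graph : List (String × Int)), Dom_verif_path path graph → Spec_verif_path path graph (verif_path path graph)

-- ===== LEMMAS AND PROOFS =====

-- A's loop returns true exactly when the scanned list is duplicate-free and disjoint from the accumulator
theorem verifLoopA_eq_true_iff (l : List String) : ∀ (used : List String),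
    verifLoopA used l = true ↔ (l.Nodup ∧ ∀ x ∈ l, x ∉ used) := by
  induction l with
  | nil => simp [verifLoopA]
  | cons c rest ih =>
      intro used
      simp only [verifLoopA]
      by_cases hc : c ∈ used
      · have : used.contains c = true := by simpa using hc
        simp only [this, if_true]
        constructor
        · intro h; cases h
        · rintro ⟨-, hall⟩
          exact absurd hc (hall c (by simp))
      · have : used.contains c = false := by simpa using hc
        simp only [this, Bool.false_eq_true, if_false]
        rw [ih (used ++ [c])]
        constructor
        · rintro ⟨hnd, hall⟩
          refine ⟨?_, ?_⟩
          · simp only [List.nodup_cons]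
            exact ⟨fun hmem => by simpa using hall c hmem, hnd⟩
          · intro y hy
            rcases List.mem_cons.mp hy with rfl | hy'
            · exact hc
            · intro hyu; exact (hall y hy') (by simp [hyu])
        · rintro ⟨hnd, hall⟩
          simp only [List.nodup_cons] at hnd
          refine ⟨hnd.2, ?_⟩
          intro y hy
          simp only [List.mem_append, List.mem_singleton]
          rintro (hyu | rfl)
          · exact (hall y (by simp [hy])) hyu
          · exact hnd.1 hy

-- the zip-with-tail all-distinct test is the adjacent-chain condition
theorem zip_tail_all_ne_iff_chain' (s : List String) :
    ((s.zip s.tail).all (fun p => p.1 != p.2) = true) ↔ s.IsChain (· ≠ ·) := by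
  induction s with
  | nil => simp
  | cons a t ih =>
      cases t with
      | nil => simp
      | cons b t' =>
          simp only [List.tail_cons, List.zip_cons_cons, List.all_cons, List.isChain_cons_cons,
            Bool.and_eq_true, bne_iff_ne]
          exact and_congr Iff.rfl (by simpa using ih)

-- a ≤-chain whose neighbours are distinct is a <-chain
theorem chain'_lt_of_le_of_ne (s : List String)
    (hle : s.IsChain (· ≤ ·)) (hne : s.IsChain (· ≠ ·)) : s.IsChain (· < ·) := by
  induction s with
  | nil => simp
  | cons a t ih =>
      cases t with
      | nil => simp
      | cons b t' =>
          rw [List.isChain_cons_cons] at hle hne ⊢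
          exact ⟨lt_of_le_of_ne hle.1 hne.1, ih hle.2 hne.2⟩

-- for the sorted list, adjacent distinctness is exactly Nodup
theorem sorted_chain'_ne_iff_nodup (l : List String) :
    (PySem.List.sorted l (fun x => x) false).IsChain (· ≠ ·) ↔ l.Nodup := by
  set s := PySem.List.sorted l (fun x => x) false with hs
  have hperm : s.Perm l := PySem.List.sorted_perm l (fun x => x) false
  have hpw : s.Pairwise (· ≤ ·) := by
    simpa using PySem.List.sorted_pairwise l (fun x => x)
  constructor
  · intro hch
    have hlt : s.IsChain (· < ·) := chain'_lt_of_le_of_ne s hpw.isChain hch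
    have : s.Pairwise (· < ·) := List.isChain_iff_pairwise.mp hlt
    exact hperm.nodup_iff.mp (this.imp ne_of_lt)
  · intro hnd
    exact ((hperm.nodup_iff.mpr hnd) : s.Pairwise (· ≠ ·)).isChain

-- ===== VERDICT (by name: the statement is the Claim_ definition above) =====
theorem verif_path_spec : Claim_equal_verif_path := by
  intro path graph _
  unfold Spec_verif_path verif_path verif_path_alt
  by_cases hg : PySem.List.len path ≠ ((PySem.Dict.ofList graph).size : Int) + 1
      ∨ PySem.List.pyGet? path 0 ≠ PySem.List.pyGet? path (-1)
  · rw [if_pos hg, if_pos hg]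
  · simp only [if_neg hg]
    set l := PySem.List.slice path none (some (-1)) with hl
    set s := PySem.List.sorted l (fun x => x) false with hs
    have htail : PySem.List.slice s (some 1) none = s.tail :=
      PySem.List.slice_from_one s
    rw [htail]
    have hA : verifLoopA [] l = true ↔ l.Nodup := by
      simpa using verifLoopA_eq_true_iff l []
    have hB : ((s.zip s.tail).all (fun p => p.1 != p.2) = true) ↔ l.Nodup :=
      (zip_tail_all_ne_iff_chain' s).trans (sorted_chain'_ne_iff_nodup l)
    by_cases hnd : l.Nodup
    · rw [hA.mpr hnd, hB.mpr hnd]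
    · have h1 : verifLoopA [] l = false := by
        cases h : verifLoopA [] l
        · rfl
        · exact absurd (hA.mp h) hnd
      have h2 : ((s.zip s.tail).all (fun p => p.1 != p.2)) = false := by
        cases h : ((s.zip s.tail).all (fun p => p.1 != p.2))
        · rfl
        · exact absurd (hB.mp h) hnd
      rw [h1, h2]
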